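-- pv_equiv track=rewrite | github.com/pypi-data/pypi-mirror-81 | packages/MetaPathways/MetaPathways-3.1.6.tar.gz/MetaPathways-3.1.6/metapathways/scripts/MetaPathways_create_genbank_ptinput_sequin.py | format_sequence_origin
-- ===== SOURCE A (Python) =====
-- def format_sequence_origin(dna_seq):
--     output=""
--     Len =  len(dna_seq)
--     for i in range(0, Len):
--        if i==0:
--           output+= '%9d' % (i+1)
--        if i%10==0:
--           output+=' '
--        if i!=0  and i%60==0:
--           output+= '\n%9d ' % (i+1)
--        output +=dna_seq[i]
--        i+=1
--     return output
-- ===== SOURCE B (Python) =====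
-- def format_sequence_origin(dna_seq):
--     # simpler: build whole lines (blocks of 60, groups of 10) and join with ' \n'
--     lines = []
--     start = 1
--     rest = dna_seq
--     while rest:
--         block, rest = rest[:60], rest[60:]
--         groups = [block[j:j+10] for j in range(0, len(block), 10)]
--         lines.append('%9d ' % start + ' '.join(groups))
--         start += 60
--     return ' \n'.join(lines)
-- ===== Notes on version B (the rewrite author's own statement) =====
-- stated objective: simpler
-- what changed: Instead of A's per-character loop that tests three boundary conditions at every index, B walks the sequence in 60-character blocks, splits each block into 10-character groups, builds each line as a width-9 start number plus the space-joined groups, and joins the lines with space-then-newline.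
import Mathlib
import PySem

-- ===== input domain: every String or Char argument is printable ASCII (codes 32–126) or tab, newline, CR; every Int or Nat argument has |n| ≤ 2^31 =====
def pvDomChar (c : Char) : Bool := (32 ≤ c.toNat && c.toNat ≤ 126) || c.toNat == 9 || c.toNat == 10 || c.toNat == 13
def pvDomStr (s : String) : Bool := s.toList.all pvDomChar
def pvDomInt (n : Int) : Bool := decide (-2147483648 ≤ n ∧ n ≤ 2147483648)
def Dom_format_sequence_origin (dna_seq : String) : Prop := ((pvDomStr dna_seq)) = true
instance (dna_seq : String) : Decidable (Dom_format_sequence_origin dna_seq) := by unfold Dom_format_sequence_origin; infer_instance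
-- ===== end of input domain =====

-- B builds whole 60-char lines (groups of 10, '%9d ' header) and joins them with ' \n',
-- instead of A's per-character loop with three boundary tests; objective: simpler.


-- ===== PORT A =====
-- '%9d' % n : str(n) right-justified in width 9 with spaces (exact for this format string)
def pvFmt9 (n : Int) : List Char :=
  let s := PySem.Int.toChars n
  List.replicate (9 - s.length) ' ' ++ s

def format_sequence_origin (dna_seq : String) : String :=
  -- output accumulated as List Char; dna_seq[i] appends that one character (always in range)
  let cs := dna_seq.toList
  let Len : Int := PySem.Str.len dna_seq
  let out := (PySem.List.pyRange 0 Len 1).foldl (fun output i =>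
      let o1 := if i = 0 then output ++ pvFmt9 (i + 1) else output
      let o2 := if PySem.Int.mod i 10 = 0 then o1 ++ [' '] else o1
      let o3 := if i ≠ 0 ∧ PySem.Int.mod i 60 = 0 then o2 ++ '\n' :: (pvFmt9 (i + 1) ++ [' ']) else o2
      o3 ++ [PySem.List.pyGetD cs i ' ']) []
  String.mk out

-- ===== PORT B =====
-- [block[j:j+10] for j in range(0, len(block), 10)]  (string slice = take/drop on the char list)
def pvGroups (l : List Char) : List (List Char) :=
  if h : l = [] then [] else l.take 10 :: pvGroups (l.drop 10)
termination_by l.length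
decreasing_by simp only [List.length_drop]; have : 0 < l.length := List.length_pos_iff.mpr h; omega

-- the while loop of Source B: one line per 60-char block, header '%9d ' % start
def pvLines (start : Int) (rest : List Char) : List (List Char) :=
  if h : rest = [] then []
  else (pvFmt9 start ++ [' '] ++ List.intercalate [' '] (pvGroups (rest.take 60)))
       :: pvLines (start + 60) (rest.drop 60)
termination_by rest.length
decreasing_by simp only [List.length_drop]; have : 0 < rest.length := List.length_pos_iff.mpr h; omega

def format_sequence_origin_alt (dna_seq : String) : String :=
  String.mk (List.intercalate [' ', '\n'] (pvLines 1 dna_seq.toList))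

-- ===== PRECONDITION & SPEC =====
def Spec_format_sequence_origin (dna_seq : String) (out : String) : Prop := out = format_sequence_origin_alt dna_seq
instance (dna_seq : String) (out : String) : Decidable (Spec_format_sequence_origin dna_seq out) := by unfold Spec_format_sequence_origin; infer_instance

-- ===== CLAIM (what is proved, stated in full; the proofs are below) =====
def Claim_equal_format_sequence_origin : Prop := ∀ (dna_seq : String), Dom_format_sequence_origin dna_seq → Spec_format_sequence_origin dna_seq (format_sequence_origin dna_seq)

-- ===== LEMMAS AND PROOFS =====

-- per-index contribution of A's loop body (without the i=0 header), over Nat indices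
def gB (i : Nat) (c : Char) : List Char :=
  (if i % 10 = 0 then [' '] else []) ++
  (if i ≠ 0 ∧ i % 60 = 0 then '\n' :: (pvFmt9 ((i : Int) + 1) ++ [' ']) else []) ++ [c]

-- with the i=0 header
def gA (i : Nat) (c : Char) : List Char :=
  (if i = 0 then pvFmt9 ((i : Int) + 1) else []) ++ gB i c

def FA (b : Nat) : List Char → List Char
  | [] => []
  | c :: t => gA b c ++ FA (b + 1) t

def FB (b : Nat) : List Char → List Char
  | [] => []
  | c :: t => gB b c ++ FB (b + 1) t

lemma pvGroups_nil : pvGroups [] = [] := by simp [pvGroups]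

lemma pvGroups_cons (l : List Char) (h : l ≠ []) :
    pvGroups l = l.take 10 :: pvGroups (l.drop 10) := by rw [pvGroups]; simp [h]

lemma pvLines_nil (s : Int) : pvLines s [] = [] := by simp [pvLines]

lemma pvLines_cons (s : Int) (l : List Char) (h : l ≠ []) :
    pvLines s l = (pvFmt9 s ++ [' '] ++ List.intercalate [' '] (pvGroups (l.take 60)))
      :: pvLines (s + 60) (l.drop 60) := by rw [pvLines]; simp [h]

lemma intercalate_cons_flat (sep a : List Char) (l : List (List Char)) :
    List.intercalate sep (a :: l) = a ++ l.flatMap (fun x => sep ++ x) := by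
  induction l generalizing a with
  | nil => simp [List.intercalate]
  | cons b t ih =>
    have h : List.intercalate sep (a :: b :: t) = a ++ (sep ++ List.intercalate sep (b :: t)) := by
      simp [List.intercalate, List.intersperse]
    rw [h, ih b]
    simp [List.append_assoc]

lemma FB_append (u v : List Char) (b : Nat) :
    FB b (u ++ v) = FB b u ++ FB (b + u.length) v := by
  induction u generalizing b with
  | nil => simp [FB]
  | cons c t ih => simp [FB, ih, Nat.add_assoc, Nat.add_comm 1 t.length]

lemma FB_split10 (t : List Char) (b : Nat) :
    FB b t = FB b (t.take 10) ++ FB (b + (t.take 10).length) (t.drop 10) := by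
  conv_lhs => rw [← List.take_append_drop 10 t]
  rw [FB_append]

lemma FB_split60 (t : List Char) (b : Nat) :
    FB b t = FB b (t.take 60) ++ FB (b + (t.take 60).length) (t.drop 60) := by
  conv_lhs => rw [← List.take_append_drop 60 t]
  rw [FB_append]

lemma FB_plain (t : List Char) (b : Nat) (h : ∀ j, j < t.length → (b + j) % 10 ≠ 0) :
    FB b t = t := by
  induction t generalizing b with
  | nil => rfl
  | cons c t ih =>
    have h0 : b % 10 ≠ 0 := by have := h 0 (by simp); simpa using this
    simp only [FB, gB, if_neg h0]
    rw [if_neg (by intro hh; exact h0 (by omega))]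
    simp only [List.nil_append, List.cons_append]
    rw [ih (b + 1) (fun j hj => by have := h (j + 1) (by simpa using Nat.succ_lt_succ hj); omega)]

lemma FB_group (t : List Char) (b : Nat) (h10 : b % 10 = 0) (h60 : b % 60 ≠ 0)
    (hlen : t.length ≤ 10) (hne : t ≠ []) : FB b t = ' ' :: t := by
  cases t with
  | nil => exact absurd rfl hne
  | cons c t' =>
    simp only [FB, gB, if_pos h10]
    rw [if_neg (by intro hh; exact h60 hh.2)]
    rw [FB_plain t' (b + 1) (fun j hj => by simp at hlen; omega)]
    simp

lemma FB_groupsTail (n : Nat) : ∀ (t : List Char) (b : Nat), t.length ≤ n →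
    b % 10 = 0 → b % 60 ≠ 0 → b % 60 + t.length ≤ 60 →
    FB b t = if t = [] then [] else ' ' :: List.intercalate [' '] (pvGroups t) := by
  induction n with
  | zero =>
    intro t b hn _ _ _
    have ht : t = [] := by cases t <;> simp_all
    simp [ht, FB]
  | succ n ih =>
    intro t b hn h10 h60 hfit
    by_cases hne : t = []
    · simp [hne, FB]
    rw [if_neg hne, FB_split10 t b]
    have htake_ne : t.take 10 ≠ [] := by simp [List.take_eq_nil_iff, hne]
    rw [FB_group (t.take 10) b h10 h60 (by simp) htake_ne]
    rw [pvGroups_cons t hne]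
    by_cases hd : t.drop 10 = []
    · have hle : t.length ≤ 10 := by rwa [List.drop_eq_nil_iff] at hd
      rw [hd, pvGroups_nil, List.take_of_length_le hle]
      simp [FB, List.intercalate]
    · have hlen10 : 10 < t.length := by
        by_contra hle
        exact hd (List.drop_eq_nil_iff.mpr (by omega))
      have hlt : (t.take 10).length = 10 := by rw [List.length_take]; omega
      rw [ih (t.drop 10) (b + (t.take 10).length)
          (by simp at hn ⊢; omega)
          (by rw [hlt]; omega)
          (by rw [hlt]; omega)
          (by rw [hlt]; simp at hfit ⊢; omega)]
      rw [if_neg hd]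
      have hgne : pvGroups (t.drop 10) ≠ [] := by rw [pvGroups_cons _ hd]; simp
      cases hg : pvGroups (t.drop 10) with
      | nil => exact absurd hg hgne
      | cons a l =>
        simp only [intercalate_cons_flat]
        simp [List.append_assoc]

lemma FB_block (t : List Char) (b : Nat) (h60 : b % 60 = 0) (hne : t ≠ [])
    (hlen : t.length ≤ 60) :
    FB b t = (if b = 0 then [] else [' ', '\n'] ++ pvFmt9 ((b : Int) + 1)) ++
      ' ' :: List.intercalate [' '] (pvGroups t) := by
  have h10 : b % 10 = 0 := by omega
  cases t with
  | nil => exact absurd rfl hne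
  | cons c t' =>
    rw [FB_split10 (c :: t') b]
    have htake : (c :: t').take 10 = c :: t'.take 9 := List.take_succ_cons
    have hfirst : FB b ((c :: t').take 10) =
        (if b = 0 then [] else [' ', '\n'] ++ pvFmt9 ((b : Int) + 1)) ++ ' ' :: (c :: t'.take 9) := by
      rw [htake]
      simp only [FB, gB, if_pos h10]
      rw [FB_plain (t'.take 9) (b + 1) (fun j hj => by simp at hj; omega)]
      by_cases hb : b = 0
      · simp [hb]
      · rw [if_pos ⟨hb, h60⟩]
        simp [hb, List.append_assoc]
    rw [hfirst, pvGroups_cons _ (by simp)]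
    by_cases hd : (c :: t').drop 10 = []
    · have hle : (c :: t').length ≤ 10 := by rwa [List.drop_eq_nil_iff] at hd
      rw [hd, pvGroups_nil, List.take_of_length_le hle]
      have ht9 : t'.take 9 = t' := List.take_of_length_le (by simp at hle; omega)
      simp [FB, List.intercalate, ht9]
    · have hlen10 : 10 < (c :: t').length := by
        by_contra hle
        exact hd (List.drop_eq_nil_iff.mpr (by omega))
      have hlt : ((c :: t').take 10).length = 10 := by rw [List.length_take]; omega
      rw [FB_groupsTail ((c :: t').drop 10).length ((c :: t').drop 10) (b + ((c :: t').take 10).length) le_rfl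
          (by rw [hlt]; omega)
          (by rw [hlt]; omega)
          (by rw [hlt]; simp at hlen ⊢; omega)]
      rw [if_neg hd]
      have hgne : pvGroups ((c :: t').drop 10) ≠ [] := by rw [pvGroups_cons _ hd]; simp
      cases hg : pvGroups ((c :: t').drop 10) with
      | nil => exact absurd hg hgne
      | cons a l =>
        simp only [intercalate_cons_flat]
        simp [htake, List.append_assoc]

lemma FB_main (n : Nat) : ∀ (t : List Char) (b : Nat), t.length ≤ n → b % 60 = 0 → b ≠ 0 →
    FB b t = (pvLines ((b : Int) + 1) t).flatMap (fun l => [' ', '\n'] ++ l) := by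
  induction n with
  | zero =>
    intro t b hn _ _
    have ht : t = [] := by cases t <;> simp_all
    simp [ht, FB, pvLines_nil]
  | succ n ih =>
    intro t b hn h60 hb0
    by_cases hne : t = []
    · simp [hne, FB, pvLines_nil]
    rw [FB_split60 t b]
    rw [FB_block (t.take 60) b h60 (by simp [List.take_eq_nil_iff, hne]) (by simp)]
    rw [if_neg hb0, pvLines_cons _ _ hne]
    by_cases hd : t.drop 60 = []
    · rw [hd, pvLines_nil]
      simp [FB, List.append_assoc]
    · have hlen60 : 60 < t.length := by
        by_contra hle
        exact hd (List.drop_eq_nil_iff.mpr (by omega))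
      have hlt : (t.take 60).length = 60 := by rw [List.length_take]; omega
      rw [ih (t.drop 60) (b + (t.take 60).length)
          (by simp at hn ⊢; omega)
          (by rw [hlt]; omega)
          (by rw [hlt]; omega)]
      have hcast : (((b + (t.take 60).length : Nat)) : Int) + 1 = (b : Int) + 1 + 60 := by
        rw [hlt]; push_cast; ring
      rw [hcast]
      simp [List.append_assoc]

lemma FA_eq_FB (t : List Char) (b : Nat) (hb : b ≠ 0) : FA b t = FB b t := by
  induction t generalizing b with
  | nil => rfl
  | cons c t ih => simp [FA, FB, gA, hb, ih (b + 1) (by omega)]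

-- A's flatMap over the index range equals FA
lemma flat_eq_FA (t : List Char) : ∀ (b : Nat) (get : Nat → Char),
    (∀ j, j < t.length → get (b + j) = t.getD j ' ') →
    (List.range t.length).flatMap (fun j => gA (b + j) (get (b + j))) = FA b t := by
  induction t with
  | nil => intro b get _; simp [FA]
  | cons c t ih =>
    intro b get hget
    rw [List.length_cons, List.range_succ_eq_map]
    simp only [List.flatMap_cons, List.flatMap_map]
    have h0 : get b = c := by simpa using hget 0 (by simp)
    rw [show (fun j => gA (b + (j + 1)) (get (b + (j + 1)))) = (fun j => gA ((b + 1) + j) (get ((b + 1) + j))) from by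
      funext j; rw [show b + (j + 1) = b + 1 + j from by omega]]
    rw [ih (b + 1) get (fun j hj => by
      have := hget (j + 1) (by simpa using Nat.succ_lt_succ hj)
      rw [show b + 1 + j = b + (j + 1) from by omega]
      simpa using this)]
    simp [FA, h0]

-- the loop body of port A, at a Nat index, is "append gA"
lemma stepA (cs : List Char) (output : List Char) (k : Nat) :
    (let o1 := if (k : Int) = 0 then output ++ pvFmt9 ((k : Int) + 1) else output
     let o2 := if PySem.Int.mod (k : Int) 10 = 0 then o1 ++ [' '] else o1
     let o3 := if (k : Int) ≠ 0 ∧ PySem.Int.mod (k : Int) 60 = 0 then o2 ++ '\n' :: (pvFmt9 ((k : Int) + 1) ++ [' ']) else o2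
     o3 ++ [PySem.List.pyGetD cs (k : Int) ' ']) = output ++ gA k (cs.getD k ' ') := by
  have hm10 : PySem.Int.mod (k : Int) 10 = ((k % 10 : Nat) : Int) := by
    exact_mod_cast PySem.Int.mod_natCast k 10
  have hm60 : PySem.Int.mod (k : Int) 60 = ((k % 60 : Nat) : Int) := by
    exact_mod_cast PySem.Int.mod_natCast k 60
  simp only [hm10, hm60, PySem.List.pyGetD_natCast, gA, gB, ne_eq,
    Nat.cast_eq_zero]
  by_cases h0 : k = 0 <;> by_cases h10 : k % 10 = 0 <;> by_cases h60 : k % 60 = 0 <;>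
    simp [h0, h10, h60, List.append_assoc]

lemma portA_eq (s : String) : format_sequence_origin s = String.mk (FA 0 s.toList) := by
  unfold format_sequence_origin
  simp only [PySem.Str.len_eq, PySem.List.pyRange_one]
  rw [show (((s.toList.length : Int) - 0).toNat) = s.toList.length from by omega]
  rw [List.foldl_map]
  rw [List.foldl_ext _ (fun (output : List Char) (k : Nat) => output ++ gA k (s.toList.getD k ' '))
      [] (fun output k _ => by simpa using stepA s.toList output k)]
  rw [PySem.List.foldl_append_eq_flatMap]
  have hflat := flat_eq_FA s.toList 0 (fun i => s.toList.getD i ' ') (fun j _ => by simp)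
  simp only [Nat.zero_add] at hflat
  rw [hflat]
  simp

-- ===== VERDICT (by name: the statement is the Claim_ definition above) =====
theorem format_sequence_origin_spec : Claim_equal_format_sequence_origin := by
  intro s _
  unfold Spec_format_sequence_origin format_sequence_origin_alt
  rw [portA_eq]
  congr 1
  by_cases hne : s.toList = []
  · simp [hne, FA, pvLines_nil, List.intercalate]
  · have hA : FA 0 s.toList = pvFmt9 1 ++ FB 0 s.toList := by
      cases hcs : s.toList with
      | nil => exact absurd hcs hne
      | cons c t =>
        simp only [FA, FB, gA]
        rw [FA_eq_FB t 1 (by omega)]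
        simp
    rw [hA, FB_split60 s.toList 0]
    rw [FB_block (s.toList.take 60) 0 rfl (by simp [List.take_eq_nil_iff, hne]) (by simp)]
    rw [pvLines_cons _ _ hne, intercalate_cons_flat]
    by_cases hd : s.toList.drop 60 = []
    · rw [hd, pvLines_nil]
      simp [FB, List.append_assoc]
    · have hlen60 : 60 < s.toList.length := by
        by_contra hle
        exact hd (List.drop_eq_nil_iff.mpr (by omega))
      have hlt : (s.toList.take 60).length = 60 := by rw [List.length_take]; omega
      rw [FB_main (s.toList.drop 60).length (s.toList.drop 60) (0 + (s.toList.take 60).length) le_rfl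
          (by simp [hlt]) (by simp [hlt])]
      have hcast : (((0 + (s.toList.take 60).length : Nat)) : Int) + 1 = (1 : Int) + 60 := by
        simp [hlt]
      rw [hcast]
      simp [List.append_assoc]
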